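-- pv_equiv track=rewrite | github.com/jiyeonyh/Algorithm | 백준/Gold/20207. 달력/달력.py | compute_result
-- ===== SOURCE A (Python) =====
-- def compute_result(planner, n):
--     total_area = 0
--     current_height = 0
--     current_width = 0
--
--     for day in range(1, 366):
--         has_schedule = False
--         max_row = 0
--
--         for row in range(n):
--             if planner[row][day]:
--                 has_schedule = True
--                 max_row = max(max_row, row + 1)
--
--         if has_schedule:
--             current_width += 1
--             current_height = max(current_height, max_row)
--         else:
--             if current_width > 0:
--                 total_area += current_height * current_width
--                 current_height = 0
--                 current_width = 0
--
--     if current_width > 0: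
--         total_area += current_height * current_width
--
--     return total_area
-- ===== SOURCE B (Python) =====
-- def compute_result(planner, n):
--     # transpose pass: last write per day is the max row+1 since rows ascend
--     h = [0] * 366
--     for row in range(n):
--         for day in range(1, 366):
--             if planner[row][day]:
--                 h[day] = row + 1
--     # per-day effective height = max over the contiguous busy stretch containing
--     # the day, obtained as max of a forward and a backward running maximum that
--     # reset on idle days; total area is the plain sum of effective heights.
--     fwd = []
--     acc = 0
--     for x in h[1:]:
--         acc = 0 if x == 0 else max(acc, x)
--         fwd.append(acc)
--     bwd = []
--     acc = 0
--     for x in reversed(h[1:]):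
--         acc = 0 if x == 0 else max(acc, x)
--         bwd.append(acc)
--     bwd.reverse()
--     return sum(max(a, b) for a, b in zip(fwd, bwd))
-- ===== Notes on version B (the rewrite author's own statement) =====
-- stated objective: alternative
-- what changed: Replaces A's run accumulator (current_height/current_width with in-loop and trailing flushes) by a scan algorithm with no run segmentation: a transposed row-major pass fills the per-day height table (later rows overwrite, so the last write is the max), then forward and backward running maxima that reset on idle days give each day's effective block height, and the result is the plain per-day sum of those maxima.
import Mathlib
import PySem

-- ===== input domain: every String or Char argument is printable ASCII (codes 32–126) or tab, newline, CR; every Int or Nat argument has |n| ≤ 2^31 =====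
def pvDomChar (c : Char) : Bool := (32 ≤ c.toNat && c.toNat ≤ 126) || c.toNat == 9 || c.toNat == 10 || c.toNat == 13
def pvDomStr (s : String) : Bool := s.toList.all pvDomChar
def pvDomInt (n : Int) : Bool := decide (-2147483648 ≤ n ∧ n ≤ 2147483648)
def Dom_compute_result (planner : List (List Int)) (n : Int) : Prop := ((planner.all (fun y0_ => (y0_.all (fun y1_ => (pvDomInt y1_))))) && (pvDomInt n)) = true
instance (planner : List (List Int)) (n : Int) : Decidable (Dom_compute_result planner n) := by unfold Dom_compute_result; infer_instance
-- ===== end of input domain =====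

set_option maxRecDepth 16384


-- B replaces A's run accumulator (current_height/current_width with in-loop and trailing
-- flushes) by a scan-based algorithm with no run segmentation: a transposed row-major pass
-- builds per-day heights, then forward and backward running maxima (reset at idle days) give
-- each day's effective height, and the answer is their plain per-day sum.

-- ===== PORT A =====
-- literal port of A: outer loop over days 1..365, inner row scan keeping (has_schedule, max_row),
-- online (total, current_height, current_width) accumulator with final flush
def compute_result (planner : List (List Int)) (n : Int) : Int :=
  let st := (PySem.List.pyRange 1 366 1).foldl (fun (s : Int × Int × Int) day =>
    let inner := (PySem.List.pyRange 0 n 1).foldl (fun (t : Bool × Int) row =>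
      if PySem.List.pyGetD (PySem.List.pyGetD planner row []) day 0 ≠ 0 then
        (true, max t.2 (row + 1)) else t) (false, 0)
    if inner.1 then (s.1, max s.2.1 inner.2, s.2.2 + 1)
    else if s.2.2 > 0 then (s.1 + s.2.1 * s.2.2, 0, 0) else s) (0, 0, 0)
  if st.2.2 > 0 then st.1 + st.2.1 * st.2.2 else st.1

-- ===== PORT B =====
-- one scan step of Source B: acc = 0 if x == 0 else max(acc, x); list.append(acc)
-- (appends are ported as cons + final reverse)
def pvScanStep (st : Int × List Int) (x : Int) : Int × List Int :=
  let v := if x = 0 then 0 else max st.1 x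
  (v, v :: st.2)

def compute_result_alt (planner : List (List Int)) (n : Int) : Int :=
  -- h = [0]*366; for row in range(n): for day in range(1,366): if planner[row][day]: h[day] = row+1
  let h := (PySem.List.pyRange 0 n 1).foldl (fun h row =>
      (PySem.List.pyRange 1 366 1).foldl (fun h day =>
        if PySem.List.pyGetD (PySem.List.pyGetD planner row []) day 0 ≠ 0
        then PySem.List.pySetD h day (row + 1) else h) h)
    (List.replicate 366 (0 : Int))
  let h1 := PySem.List.slice h (some 1) none      -- h[1:]
  let fwd := (h1.foldl pvScanStep (0, [])).2.reverse
  let bwd := ((h1.reverse.foldl pvScanStep (0, [])).2.reverse).reverse   -- scan reversed(h1), then bwd.reverse()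
  (List.zipWith (fun a b => max a b) fwd bwd).sum  -- sum(max(a,b) for a,b in zip(fwd,bwd))

-- ===== PRECONDITION & SPEC =====
-- Pre_ excludes exactly the inputs on which Python A raises IndexError:
-- it reads planner[row][day] for every row in range(n) and day in 1..365.
def Pre_compute_result (planner : List (List Int)) (n : Int) : Prop :=
  n ≤ (planner.length : Int) ∧ ∀ i : Fin planner.length, (i : Int) < n → 366 ≤ planner[i].length
instance (planner : List (List Int)) (n : Int) : Decidable (Pre_compute_result planner n) := by
  unfold Pre_compute_result; infer_instance

def pvWitness_compute_result : List (List Int) × Int := ([], 0)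

def Spec_compute_result (planner : List (List Int)) (n : Int) (out : Int) : Prop := out = compute_result_alt planner n
instance (planner : List (List Int)) (n : Int) (out : Int) : Decidable (Spec_compute_result planner n out) := by unfold Spec_compute_result; infer_instance

-- ===== CLAIM (what is proved, stated in full; the proofs are below) =====
def Claim_equal_compute_result : Prop := ∀ (planner : List (List Int)) (n : Int), Dom_compute_result planner n → Pre_compute_result planner n → Spec_compute_result planner n (compute_result planner n)

-- ===== LEMMAS AND PROOFS =====

-- the per-day height: max((row+1 for row in range(n) if planner[row][day]), default=0)
def pvDayHeight (planner : List (List Int)) (n : Int) (day : Int) : Int :=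
  PySem.List.maxD ((PySem.List.pyRange 0 n 1).filterMap (fun row =>
    if PySem.List.pyGetD (PySem.List.pyGetD planner row []) day 0 ≠ 0 then some (row + 1)
    else none)) (fun h => h) 0

-- A's outer-loop body as a step on (total, current_height, current_width)
def pvStepA (s : Int × Int × Int) (h : Int) : Int × Int × Int :=
  if h > 0 then (s.1, max s.2.1 h, s.2.2 + 1)
  else if s.2.2 > 0 then (s.1 + s.2.1 * s.2.2, 0, 0) else s

-- total area contributed by hs when the pending run has height ch and width cw
def pvBsum : Int → Int → List Int → Int
  | ch, cw, [] => if cw > 0 then ch * cw else 0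
  | ch, cw, h :: t =>
    if h > 0 then pvBsum (max ch h) (cw + 1) t
    else if cw > 0 then ch * cw + pvBsum 0 0 t else pvBsum ch cw t

-- the running maximum that resets on zeros, as a list (B's fwd/bwd scans)
def pvScan : Int → List Int → List Int
  | _, [] => []
  | a, x :: t => (if x = 0 then 0 else max a x) :: pvScan (if x = 0 then 0 else max a x) t

-- its final accumulator
def pvAcc : Int → List Int → Int
  | a, [] => a
  | a, x :: t => pvAcc (if x = 0 then 0 else max a x) t

lemma pvFold_general (p : Int → Prop) [DecidablePred p] (rs : List Int) (b : Bool) (m : Int) :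
    rs.foldl (fun (t : Bool × Int) row => if p row then (true, max t.2 (row + 1)) else t) (b, m)
    = (b || !(rs.filterMap (fun r => if p r then some (r + 1) else none)).isEmpty,
       (rs.filterMap (fun r => if p r then some (r + 1) else none)).foldl max m) := by
  induction rs generalizing b m with
  | nil => simp
  | cons r rs ih =>
    by_cases h : p r
    · simp [h, ih]
    · simp [h, ih]

lemma pvInner_eq (planner : List (List Int)) (n day : Int) :
    (PySem.List.pyRange 0 n 1).foldl (fun (t : Bool × Int) row =>
      if PySem.List.pyGetD (PySem.List.pyGetD planner row []) day 0 ≠ 0 then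
        (true, max t.2 (row + 1)) else t) (false, 0)
    = (decide (pvDayHeight planner n day > 0), pvDayHeight planner n day) := by
  rw [pvFold_general]
  unfold pvDayHeight PySem.List.maxD
  set L := (PySem.List.pyRange 0 n 1).filterMap (fun row =>
    if PySem.List.pyGetD (PySem.List.pyGetD planner row []) day 0 ≠ 0 then some (row + 1)
    else none) with hL
  have hpos : ∀ x ∈ L, 1 ≤ x := by
    intro x hx
    rw [hL, List.mem_filterMap] at hx
    obtain ⟨r, hr, hfr⟩ := hx
    have h0 : 0 ≤ r := (PySem.List.mem_pyRange_one.mp hr).1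
    by_cases hc : PySem.List.pyGetD (PySem.List.pyGetD planner r []) day 0 ≠ 0
    · simp [hc] at hfr; omega
    · simp [hc] at hfr
  clear_value L
  cases L with
  | nil => rfl
  | cons x t =>
    have hx1 : 1 ≤ x := hpos x List.mem_cons_self
    have hle : x ≤ t.foldl max x := (PySem.List.le_foldl_max t x).1
    rw [PySem.List.max?_id_cons]
    simp only [Option.getD_some, List.isEmpty_cons, Bool.not_false, Bool.false_or,
      List.foldl_cons]
    have hm : max 0 x = x := by omega
    have hgt : t.foldl max x > 0 := by omega
    rw [hm]
    simp [hgt]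

lemma pvA_fold (hs : List Int) : ∀ (t ch cw : Int),
    (if (hs.foldl pvStepA (t, ch, cw)).2.2 > 0
     then (hs.foldl pvStepA (t, ch, cw)).1
          + (hs.foldl pvStepA (t, ch, cw)).2.1 * (hs.foldl pvStepA (t, ch, cw)).2.2
     else (hs.foldl pvStepA (t, ch, cw)).1) = t + pvBsum ch cw hs := by
  induction hs with
  | nil =>
    intro t ch cw
    simp only [List.foldl_nil, pvBsum]
    split_ifs <;> ring
  | cons h hs ih =>
    intro t ch cw
    simp only [List.foldl_cons, pvStepA, pvBsum]
    by_cases h1 : h > 0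
    · simp only [h1, if_true]
      exact ih t (max ch h) (cw + 1)
    · simp only [h1, if_false]
      by_cases h2 : cw > 0
      · simp only [h2, if_true]
        rw [ih (t + ch * cw) 0 0]; ring
      · simp only [h2, if_false]
        exact ih t ch cw

lemma pvBsum_pos (pre : List Int) (h : ∀ x ∈ pre, x > 0) : ∀ (rest : List Int) (ch cw : Int),
    pvBsum ch cw (pre ++ rest) = pvBsum (pre.foldl max ch) (cw + (pre.length : Int)) rest := by
  induction pre with
  | nil => intro rest ch cw; simp
  | cons p pre ih =>
    intro rest ch cw
    have hp : p > 0 := h p (by simp)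
    simp only [List.cons_append, pvBsum, hp, if_true, List.foldl_cons, List.length_cons]
    rw [ih (fun x hx => h x (by simp [hx])) rest (max ch p) (cw + 1)]
    congr 1
    push_cast
    ring

-- pvBsum over a positive run followed by an idle day: the run flushes
lemma pvBsum_run (u v : List Int) (h : ∀ x ∈ u, x > 0) :
    pvBsum 0 0 (u ++ 0 :: v) = (u.foldl max 0) * (u.length : Int) + pvBsum 0 0 v := by
  rw [pvBsum_pos u h (0 :: v) 0 0]
  cases u with
  | nil => simp [pvBsum]
  | cons x t =>
    have hx : x > 0 := h x (by simp)
    have hcw : (0 : Int) + ((x :: t).length : Int) > 0 := by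
      simp only [List.length_cons]; push_cast; omega
    simp only [pvBsum, if_neg (by omega : ¬ (0:Int) > 0), if_pos hcw]
    ring

-- ---- scan machinery ----

lemma pvScan_length (xs : List Int) : ∀ a, (pvScan a xs).length = xs.length := by
  induction xs with
  | nil => intro a; rfl
  | cons x t ih => intro a; simp [pvScan, ih]

-- Source B's append-loop computes (final acc, reversed scan ++ initial list)
lemma pvScanFold (xs : List Int) : ∀ (a : Int) (acc : List Int),
    xs.foldl pvScanStep (a, acc) = (pvAcc a xs, (pvScan a xs).reverse ++ acc) := by
  induction xs with
  | nil => intro a acc; simp [pvScan, pvAcc]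
  | cons x t ih =>
    intro a acc
    simp only [List.foldl_cons, pvScanStep, pvScan, pvAcc, List.reverse_cons, List.append_assoc]
    rw [ih]
    simp

lemma pvScan_append (u v : List Int) : ∀ a, pvScan a (u ++ v) = pvScan a u ++ pvScan (pvAcc a u) v := by
  induction u with
  | nil => intro a; rfl
  | cons x t ih => intro a; simp [pvScan, pvAcc, ih]

lemma pvAcc_pos (u : List Int) (h : ∀ x ∈ u, x ≠ 0) : ∀ a, pvAcc a u = u.foldl max a := by
  induction u with
  | nil => intro a; rfl
  | cons x t ih =>
    intro a
    have hx : x ≠ 0 := h x (by simp)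
    simp only [pvAcc, if_neg hx, List.foldl_cons]
    exact ih (fun y hy => h y (by simp [hy])) (max a x)

lemma pvFmax_hoist (t : List Int) : ∀ c d : Int, t.foldl max (max c d) = max c (t.foldl max d) := by
  induction t with
  | nil => intro c d; rfl
  | cons y t ih =>
    intro c d
    simp only [List.foldl_cons]
    rw [show max (max c d) y = max c (max d y) by omega, ih]

lemma pvFmax_rev (u : List Int) : ∀ b : Int, u.reverse.foldl max b = u.foldl max b := by
  induction u with
  | nil => intro b; rfl
  | cons x t ih =>
    intro b
    simp only [List.reverse_cons, List.foldl_append, List.foldl_cons, List.foldl_nil, ih]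
    rw [show max b x = max x b by omega, pvFmax_hoist]
    rw [show t.foldl max b = max b (t.foldl max b) by
      have := (PySem.List.le_foldl_max t b).1; omega]
    omega

-- a run with no idle day: the zipped bidirectional scan sums to length * overall max
lemma pvRunSum (u : List Int) : ∀ (a b : Int), (∀ y ∈ u, y ≠ 0) →
    (List.zipWith max (pvScan a u) ((pvScan b u.reverse).reverse)).sum
      = (u.length : Int) * (u.foldl max (max a b)) := by
  induction u with
  | nil => intro a b _; simp [pvScan]
  | cons x t ih =>
    intro a b hnz
    have hx : x ≠ 0 := hnz x (by simp)
    have hnt : ∀ y ∈ t, y ≠ 0 := fun y hy => hnz y (by simp [hy])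
    have hntr : ∀ y ∈ t.reverse, y ≠ 0 := fun y hy => hnt y (by simpa using hy)
    -- backward scan of (x :: t).reverse = scan of t.reverse then one step on x
    have hrev : (pvScan b (x :: t).reverse).reverse
        = max (t.foldl max b) x :: (pvScan b t.reverse).reverse := by
      rw [List.reverse_cons, pvScan_append]
      simp only [pvScan, if_neg hx, List.reverse_append, List.reverse_cons, List.reverse_nil,
        List.nil_append]
      rw [pvAcc_pos t.reverse hntr b, pvFmax_rev]
      rfl
    rw [hrev]
    simp only [pvScan, if_neg hx, List.zipWith_cons_cons, List.sum_cons]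
    rw [ih (max a x) b hnt]
    have hM : t.foldl max (max (max a x) b) = t.foldl max (max (max a b) x) := by
      rw [show max (max a x) b = max (max a b) x by omega]
    have hhead : max (max a x) (max (t.foldl max b) x) = t.foldl max (max (max a b) x) := by
      rw [show max (max a b) x = max (max a x) (max b x) by omega, pvFmax_hoist]
      rw [show max b x = max x b by omega, pvFmax_hoist]
      have := (PySem.List.le_foldl_max t b).1
      omega
    rw [hM, hhead]
    simp only [List.length_cons, List.foldl_cons]
    push_cast
    ring

-- main scan lemma: sum of per-day bidirectional maxima = run-flush accumulation
lemma pvScanBsum (hs : List Int) (hnn : ∀ x ∈ hs, 0 ≤ x) :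
    (List.zipWith max (pvScan 0 hs) ((pvScan 0 hs.reverse).reverse)).sum = pvBsum 0 0 hs := by
  by_cases hz : (0 : Int) ∈ hs
  · -- split at the first zero: hs = u ++ 0 :: v with u zero-free
    set u := hs.takeWhile (fun x => x ≠ 0) with hu
    set r := hs.dropWhile (fun x => x ≠ 0) with hr
    have hsplit : u ++ r = hs := List.takeWhile_append_dropWhile
    have hunz : ∀ y ∈ u, y ≠ 0 := by
      intro y hy
      have := List.mem_takeWhile_imp hy
      simpa using this
    have hrne : r ≠ [] := by
      intro hemp
      have : (0 : Int) ∈ u := by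
        rw [← hsplit] at hz; simpa [hemp] using hz
      exact hunz 0 this rfl
    obtain ⟨z, v, hzv⟩ := List.exists_cons_of_ne_nil hrne
    have hz0 : z = 0 := by
      have hd := List.head?_dropWhile_not (fun x => decide (x ≠ 0)) hs
      rw [← hr] at hd
      · rw [hzv] at hd
        simp only [List.head?_cons] at hd
        simpa using hd
    subst hz0
    have hhs : hs = u ++ 0 :: v := by rw [← hsplit, hzv]
    have hupos : ∀ x ∈ u, x > 0 := by
      intro x hx
      have h1 : 0 ≤ x := hnn x (by rw [hhs]; exact List.mem_append_left _ hx)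
      have h2 := hunz x hx
      omega
    have hvnn : ∀ x ∈ v, 0 ≤ x := by
      intro x hx
      exact hnn x (by rw [hhs]; exact List.mem_append_right _ (by simp [hx]))
    -- decompose both scans at the zero
    have hfwd : pvScan 0 hs = pvScan 0 u ++ 0 :: pvScan 0 v := by
      rw [hhs, pvScan_append]
      simp [pvScan]
    have hbwd : (pvScan 0 hs.reverse).reverse
        = (pvScan 0 u.reverse).reverse ++ 0 :: (pvScan 0 v.reverse).reverse := by
      rw [hhs]
      rw [show (u ++ 0 :: v).reverse = v.reverse ++ 0 :: u.reverse by simp]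
      rw [pvScan_append]
      simp [pvScan]
    rw [hfwd, hbwd]
    rw [List.zipWith_append (by rw [pvScan_length, List.length_reverse, pvScan_length, List.length_reverse])]
    simp only [List.zipWith_cons_cons, List.sum_append, List.sum_cons]
    rw [pvRunSum u 0 0 hunz, pvScanBsum v hvnn, hhs, pvBsum_run u v hupos]
    have : max (0:Int) 0 = 0 := by omega
    rw [this]
    ring
  · -- no idle day at all: one single run
    have hunz : ∀ y ∈ hs, y ≠ 0 := fun y hy h0 => hz (h0 ▸ hy)
    have hupos : ∀ x ∈ hs, x > 0 := by
      intro x hx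
      have := hnn x hx
      have := hunz x hx
      omega
    rw [pvRunSum hs 0 0 hunz]
    have hp := pvBsum_pos hs hupos [] 0 0
    rw [List.append_nil] at hp
    rw [hp]
    cases hhs : hs with
    | nil => simp [pvBsum]
    | cons x t =>
      have hlen : (0:Int) + ((x :: t).length : Int) > 0 := by
        simp only [List.length_cons]; push_cast; omega
      simp only [pvBsum, if_pos hlen]
      have hm : max (0:Int) 0 = 0 := by omega
      rw [hm]
      ring
termination_by hs.length
decreasing_by
  rw [hhs]
  simp only [List.length_append, List.length_cons]
  omega

-- ---- the built height table equals the per-day heights ----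

-- the per-day height as a Nat-indexed fold over rows ([..] = "last truthy row + 1" = max)
def pvDH (planner : List (List Int)) (k : Nat) (j : Nat) : Int :=
  ((List.range k).map (fun r : Nat => (r : Int))).foldl (fun m r =>
    if PySem.List.pyGetD (PySem.List.pyGetD planner r []) (j : Int) 0 ≠ 0
    then max m (r + 1) else m) 0

lemma pvDH_bounds (planner : List (List Int)) (k : Nat) (j : Nat) :
    0 ≤ pvDH planner k j ∧ pvDH planner k j ≤ (k : Int) := by
  induction k with
  | zero => simp [pvDH]
  | succ k ih =>
    unfold pvDH at *
    rw [List.range_succ, List.map_append, List.foldl_append, List.map_singleton,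
      List.foldl_cons, List.foldl_nil]
    split_ifs
    · constructor
      · have := ih.1; omega
      · push_cast; have := ih.2; omega
    · constructor
      · exact ih.1
      · have := ih.2; push_cast; omega

-- inner day-loop of B: sets exactly the truthy days of this row to row+1
lemma pvSetFold_getD (p : Int → Prop) [DecidablePred p] (v : Int) (ds : List Int)
    (hds : ∀ d ∈ ds, 1 ≤ d) : ∀ (h0 : List Int) (j : Nat), j < h0.length →
    ((ds.foldl (fun h d => if p d then PySem.List.pySetD h d v else h) h0).getD j 0)
      = if (∃ d ∈ ds, d.toNat = j ∧ p d) then v else h0.getD j 0 := by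
  induction ds with
  | nil => intro h0 j hj; simp
  | cons d ds ih =>
    intro h0 j hj
    have hd1 : (1 : Int) ≤ d := hds d (by simp)
    have hds' : ∀ d' ∈ ds, 1 ≤ d' := fun d' hd' => hds d' (by simp [hd'])
    simp only [List.foldl_cons]
    have hlen : (if p d then PySem.List.pySetD h0 d v else h0).length = h0.length := by
      split_ifs
      · exact PySem.List.length_pySetD h0 d v
      · rfl
    rw [ih hds' _ j (by rw [hlen]; exact hj)]
    by_cases hex : ∃ d' ∈ ds, d'.toNat = j ∧ p d'
    · rw [if_pos hex, if_pos (by obtain ⟨d', h1, h2, h3⟩ := hex; exact ⟨d', by simp [h1], h2, h3⟩)]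
    · rw [if_neg hex]
      by_cases hpd : p d
      · simp only [if_pos hpd]
        rw [PySem.List.pySetD_of_nonneg h0 v (by omega : (0:Int) ≤ d)]
        by_cases heq : d.toNat = j
        · rw [if_pos ⟨d, by simp, heq, hpd⟩]
          rw [heq]
          rw [List.getD_eq_getElem?_getD, List.getElem?_set_self (by omega : j < h0.length)]
          rfl
        · have hnex : ¬ ∃ d' ∈ d :: ds, d'.toNat = j ∧ p d' := by
            rintro ⟨d', hmem, ht, hp'⟩
            rcases List.mem_cons.mp hmem with h | h
            · exact heq (h ▸ ht)
            · exact hex ⟨d', h, ht, hp'⟩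
          rw [if_neg hnex]
          rw [List.getD_eq_getElem?_getD, List.getElem?_set_ne heq, ← List.getD_eq_getElem?_getD]
      · simp only [if_neg hpd]
        have hnex : ¬ ∃ d' ∈ d :: ds, d'.toNat = j ∧ p d' := by
          rintro ⟨d', hmem, ht, hp'⟩
          rcases List.mem_cons.mp hmem with h | h
          · exact hpd (h ▸ hp')
          · exact hex ⟨d', h, ht, hp'⟩
        rw [if_neg hnex]

-- length invariants of the build
lemma pvBuild_inner_length (planner : List (List Int)) (row : Int) (h0 : List Int) :
    ((PySem.List.pyRange 1 366 1).foldl (fun h day =>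
      if PySem.List.pyGetD (PySem.List.pyGetD planner row []) day 0 ≠ 0
      then PySem.List.pySetD h day (row + 1) else h) h0).length = h0.length := by
  generalize PySem.List.pyRange 1 366 1 = ds
  induction ds generalizing h0 with
  | nil => rfl
  | cons d ds ih =>
    simp only [List.foldl_cons]
    rw [ih]
    split_ifs
    · exact PySem.List.length_pySetD h0 d (row + 1)
    · rfl

lemma pvBuild_length (planner : List (List Int)) (rs : List Int) (h0 : List Int) :
    (rs.foldl (fun h row =>
      (PySem.List.pyRange 1 366 1).foldl (fun h day =>
        if PySem.List.pyGetD (PySem.List.pyGetD planner row []) day 0 ≠ 0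
        then PySem.List.pySetD h day (row + 1) else h) h) h0).length = h0.length := by
  induction rs generalizing h0 with
  | nil => rfl
  | cons r rs ih =>
    simp only [List.foldl_cons]
    rw [ih, pvBuild_inner_length]

-- after processing rows 0..k-1, slot j (1 ≤ j ≤ 365) holds the running max height
lemma pvBuild_getD (planner : List (List Int)) (k : Nat) (j : Nat) (hj1 : 1 ≤ j) (hj2 : j < 366) :
    ((PySem.List.pyRange 0 (k : Int) 1).foldl (fun h row =>
      (PySem.List.pyRange 1 366 1).foldl (fun h day =>
        if PySem.List.pyGetD (PySem.List.pyGetD planner row []) day 0 ≠ 0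
        then PySem.List.pySetD h day (row + 1) else h) h)
      (List.replicate 366 (0 : Int))).getD j 0 = pvDH planner k j := by
  induction k with
  | zero =>
    rw [show PySem.List.pyRange 0 ((0 : Nat) : Int) 1 = []
      from PySem.List.pyRange_one_eq_nil (by omega)]
    simp only [List.foldl_nil]
    rw [List.getD_eq_getElem?_getD, List.getElem?_replicate, if_pos hj2]
    simp [pvDH]
  | succ k ih =>
    rw [show ((k + 1 : Nat) : Int) = (k : Int) + 1 by push_cast; ring,
      PySem.List.pyRange_one_succ_right (by positivity), List.foldl_append, List.foldl_cons,
      List.foldl_nil]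
    rw [pvSetFold_getD _ _ _ (fun d hd => (PySem.List.mem_pyRange_one.mp hd).1) _ j
      (by rw [pvBuild_length]; simpa using hj2)]
    unfold pvDH
    rw [List.range_succ, List.map_append, List.foldl_append, List.map_singleton,
      List.foldl_cons, List.foldl_nil]
    have hex : (∃ d ∈ PySem.List.pyRange 1 366 1, d.toNat = j ∧
        PySem.List.pyGetD (PySem.List.pyGetD planner (k : Int) []) d 0 ≠ 0) ↔
        PySem.List.pyGetD (PySem.List.pyGetD planner (k : Int) []) (j : Int) 0 ≠ 0 := by
      constructor
      · rintro ⟨d, hmem, ht, hp⟩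
        have h1 := (PySem.List.mem_pyRange_one.mp hmem).1
        have : d = (j : Int) := by omega
        exact this ▸ hp
      · intro hp
        exact ⟨(j : Int), PySem.List.mem_pyRange_one.mpr (by omega), by simp, hp⟩
    by_cases hp : PySem.List.pyGetD (PySem.List.pyGetD planner (k : Int) []) (j : Int) 0 ≠ 0
    · rw [if_pos (hex.mpr hp), if_pos hp]
      have := (pvDH_bounds planner k j).2
      unfold pvDH at this
      omega
    · rw [if_neg (fun h => hp (hex.mp h)), if_neg hp]
      exact ih

-- pvDayHeight at a Nat row count equals the fold pvDH
lemma pvMaxD_eq_foldl (l : List Int) (h : ∀ x ∈ l, 0 ≤ x) :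
    PySem.List.maxD l (fun x => x) 0 = l.foldl max 0 := by
  cases l with
  | nil => rfl
  | cons x t =>
    unfold PySem.List.maxD
    rw [PySem.List.max?_id_cons, Option.getD_some, List.foldl_cons]
    rw [show max (0:Int) x = x by have := h x (by simp); omega]

lemma pvFilterMax_eq (p : Int → Prop) [DecidablePred p] (g : Int → Int) (rs : List Int) :
    ∀ m : Int, (rs.filterMap (fun r => if p r then some (g r) else none)).foldl max m
      = rs.foldl (fun m r => if p r then max m (g r) else m) m := by
  induction rs with
  | nil => intro m; rfl
  | cons r rs ih =>
    intro m
    by_cases hp : p r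
    · simp [hp, ih]
    · simp [hp, ih]

lemma pvDayHeight_eq_pvDH (planner : List (List Int)) (k : Nat) (j : Nat) :
    pvDayHeight planner (k : Int) (j : Int) = pvDH planner k j := by
  unfold pvDayHeight pvDH
  rw [pvMaxD_eq_foldl _ (by
    intro x hx
    rw [List.mem_filterMap] at hx
    obtain ⟨r, hr, hfr⟩ := hx
    have h0 : 0 ≤ r := (PySem.List.mem_pyRange_one.mp hr).1
    by_cases hc : PySem.List.pyGetD (PySem.List.pyGetD planner r []) (j : Int) 0 ≠ 0
    · rw [if_pos hc] at hfr
      have : r + 1 = x := Option.some.inj hfr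
      omega
    · rw [if_neg hc] at hfr
      exact absurd hfr (by simp))]
  rw [pvFilterMax_eq]
  rw [PySem.List.pyRange_one]
  rw [show ((k : Int) - 0).toNat = k by omega]
  rw [List.foldl_map, List.foldl_map]
  simp

lemma pvDayHeight_nonneg (planner : List (List Int)) (n day : Int) :
    0 ≤ pvDayHeight planner n day := by
  unfold pvDayHeight
  set L := (PySem.List.pyRange 0 n 1).filterMap (fun row =>
    if PySem.List.pyGetD (PySem.List.pyGetD planner row []) day 0 ≠ 0 then some (row + 1)
    else none) with hL
  have hpos : ∀ x ∈ L, 1 ≤ x := by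
    intro x hx
    rw [hL, List.mem_filterMap] at hx
    obtain ⟨r, hr, hfr⟩ := hx
    have h0 : 0 ≤ r := (PySem.List.mem_pyRange_one.mp hr).1
    by_cases hc : PySem.List.pyGetD (PySem.List.pyGetD planner r []) day 0 ≠ 0
    · simp [hc] at hfr; omega
    · simp [hc] at hfr
  clear_value L
  cases L with
  | nil => exact le_refl (0 : Int)
  | cons x t =>
    unfold PySem.List.maxD
    rw [PySem.List.max?_id_cons, Option.getD_some]
    have hx1 : 1 ≤ x := hpos x List.mem_cons_self
    have := (PySem.List.le_foldl_max t x).1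
    omega

-- any Int row count reduces to its toNat
lemma pvRange_toNat (n : Int) : PySem.List.pyRange 0 n 1 = PySem.List.pyRange 0 ((n.toNat : Nat) : Int) 1 := by
  have h : (n - 0).toNat = (((n.toNat : Nat) : Int) - 0).toNat := by omega
  rw [PySem.List.pyRange_one, PySem.List.pyRange_one, h]

-- the tail of the built table is exactly the day-height list
lemma pvBuild_tail (planner : List (List Int)) (n : Int) :
    PySem.List.slice ((PySem.List.pyRange 0 n 1).foldl (fun h row =>
      (PySem.List.pyRange 1 366 1).foldl (fun h day =>
        if PySem.List.pyGetD (PySem.List.pyGetD planner row []) day 0 ≠ 0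
        then PySem.List.pySetD h day (row + 1) else h) h)
      (List.replicate 366 (0 : Int))) (some 1) none
    = (PySem.List.pyRange 1 366 1).map (pvDayHeight planner n) := by
  rw [PySem.List.slice_from_one]
  set bld := (PySem.List.pyRange 0 n 1).foldl (fun h row =>
      (PySem.List.pyRange 1 366 1).foldl (fun h day =>
        if PySem.List.pyGetD (PySem.List.pyGetD planner row []) day 0 ≠ 0
        then PySem.List.pySetD h day (row + 1) else h) h)
      (List.replicate 366 (0 : Int)) with hbld
  have hlen : bld.length = 366 := by
    rw [hbld, pvBuild_length]; simp
  apply List.ext_getElem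
  · simp only [List.length_tail, hlen, List.length_map, PySem.List.length_pyRange_one]
    omega
  · intro i h1 h2
    have hi : i < 365 := by simpa [List.length_tail, hlen] using h1
    rw [List.getElem_tail]
    rw [List.getElem_map, PySem.List.getElem_pyRange_one]
    have hget : bld[i + 1]'(by omega) = bld.getD (i + 1) 0 := by
      rw [List.getD_eq_getElem?_getD, List.getElem?_eq_getElem (by omega), Option.getD_some]
    rw [hget, hbld, pvRange_toNat, pvBuild_getD planner n.toNat (i + 1) (by omega) (by omega)]
    have : (1 : Int) + (i : Int) = (((i + 1 : Nat)) : Int) := by push_cast; ring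
    rw [this]
    rw [show pvDayHeight planner n = pvDayHeight planner ((n.toNat : Nat) : Int) by
      unfold pvDayHeight; rw [pvRange_toNat]]
    exact (pvDayHeight_eq_pvDH planner n.toNat (i + 1)).symm

-- ===== VERDICT (by name: the statement is the Claim_ definition above) =====
theorem compute_result_spec : Claim_equal_compute_result := by
  intro planner n _ _
  unfold Spec_compute_result compute_result compute_result_alt
  simp only [pvInner_eq, pvBuild_tail]
  -- A's side: the day loop is pvStepA over the day-height list
  have hbody : (fun (s : Int × Int × Int) day =>
      if (decide (pvDayHeight planner n day > 0), pvDayHeight planner n day).1 = true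
      then (s.1, max s.2.1 (decide (pvDayHeight planner n day > 0), pvDayHeight planner n day).2, s.2.2 + 1)
      else if s.2.2 > 0 then (s.1 + s.2.1 * s.2.2, 0, 0) else s)
      = (fun (s : Int × Int × Int) day => pvStepA s (pvDayHeight planner n day)) := by
    funext s day
    simp [pvStepA]
  rw [hbody]
  rw [← List.foldl_map (f := pvDayHeight planner n) (g := pvStepA)]
  rw [pvA_fold]
  -- B's side: the two append-loops are scans, their zipped sum is pvBsum
  set hs := (PySem.List.pyRange 1 366 1).map (pvDayHeight planner n) with hhs
  rw [pvScanFold, pvScanFold]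
  simp only [List.append_nil, List.reverse_reverse]
  rw [pvScanBsum hs (by
    intro x hx
    rw [hhs, List.mem_map] at hx
    obtain ⟨d, _, hd⟩ := hx
    rw [← hd]
    exact pvDayHeight_nonneg planner n d)]
  ring
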